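-- pv_equiv track=rewrite | github.com/Shad280/wisenews- | notification_manager.py | _get_category_context
-- ===== SOURCE A (Python) =====
-- from typing import List, Dict, Optional, Tuple
--
-- def _get_category_context(category: str, title: str, keywords: List[str]) -> str:
--     """Generate category-specific context for notifications"""
--     category_lower = category.lower()
--     title_lower = title.lower()
--
--     if category_lower in ['politics', 'government']:
--         if any(word in title_lower for word in ['election', 'vote', 'campaign']):
--             return "This political development could influence upcoming electoral processes and policy decisions."
--         elif any(word in title_lower for word in ['policy', 'law', 'regulation']):
--             return "This policy change may affect regulatory frameworks and citizen rights."
--         else: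
--             return "This political news could have implications for governance and public policy."
--
--     elif category_lower in ['technology', 'tech']:
--         if any(word in title_lower for word in ['ai', 'artificial intelligence', 'machine learning']):
--             return "This AI development could reshape technology applications and industry standards."
--         elif any(word in title_lower for word in ['crypto', 'bitcoin', 'blockchain']):
--             return "This cryptocurrency news may impact digital asset markets and regulatory approaches."
--         else:
--             return "This technology update could influence digital innovation and market trends."
--
--     elif category_lower in ['business', 'finance', 'economy']:
--         if any(word in title_lower for word in ['earnings', 'quarterly', 'revenue', 'profit']):
--             return "These financial results may influence company valuations, investor sentiment, and sector-wide performance metrics."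
--         elif any(word in title_lower for word in ['acquisition', 'merger', 'deal', 'buyout']):
--             return "This M&A activity could reshape competitive dynamics, create market consolidation, and influence strategic positioning across the industry."
--         elif any(word in title_lower for word in ['ceo', 'leadership', 'executive', 'management']):
--             return "This leadership development may impact corporate strategy, operational execution, and investor confidence in the company's direction."
--         elif any(word in title_lower for word in ['product', 'launch', 'innovation', 'technology']):
--             return "This product development could drive revenue growth, enhance competitive positioning, and influence market share dynamics."
--         elif any(word in title_lower for word in ['stock', 'market', 'trading']):
--             return "This market news could affect investment decisions and portfolio performance."
--         else:
--             return "This business development could impact economic trends and market conditions."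
--
--     elif category_lower in ['health', 'medical']:
--         if any(word in title_lower for word in ['covid', 'pandemic', 'vaccine']):
--             return "This health update may affect public health policies and safety measures."
--         else:
--             return "This health news could influence medical practices and patient care."
--
--     elif category_lower in ['sports']:
--         if any(word in title_lower for word in ['championship', 'final', 'playoff']):
--             return "This major sporting event could determine championship outcomes and legacy records."
--         else:
--             return "This sports update may affect team standings and upcoming match dynamics."
--
--     elif category_lower in ['entertainment']:
--         return "This entertainment news reflects current cultural trends and audience preferences."
--
--     else:
--         return "This story contributes to your comprehensive understanding of current events."
-- ===== SOURCE B (Python) =====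
-- from typing import List, Tuple
--
--
-- def _flat(*rules: Tuple[Tuple[str, ...], str]) -> List[Tuple[str, str]]:
--     """Flatten (keywords, message) rules into one ordered (keyword, message) list."""
--     return [(w, msg) for words, msg in rules for w in words]
--
--
-- # One dictionary keyed directly by each accepted (lower-case) category name.
-- # Value = (flat ordered keyword->message list, category default message).
-- _TABLE = {}
--
-- _pol = (_flat((('election', 'vote', 'campaign'),
--                "This political development could influence upcoming electoral processes and policy decisions."),
--               (('policy', 'law', 'regulation'),
--                "This policy change may affect regulatory frameworks and citizen rights.")),
--         "This political news could have implications for governance and public policy.")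
-- _TABLE['politics'] = _pol
-- _TABLE['government'] = _pol
--
-- _tech = (_flat((('ai', 'artificial intelligence', 'machine learning'),
--                 "This AI development could reshape technology applications and industry standards."),
--                (('crypto', 'bitcoin', 'blockchain'),
--                 "This cryptocurrency news may impact digital asset markets and regulatory approaches.")),
--          "This technology update could influence digital innovation and market trends.")
-- _TABLE['technology'] = _tech
-- _TABLE['tech'] = _tech
--
-- _biz = (_flat((('earnings', 'quarterly', 'revenue', 'profit'),
--                "These financial results may influence company valuations, investor sentiment, and sector-wide performance metrics."),
--               (('acquisition', 'merger', 'deal', 'buyout'),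
--                "This M&A activity could reshape competitive dynamics, create market consolidation, and influence strategic positioning across the industry."),
--               (('ceo', 'leadership', 'executive', 'management'),
--                "This leadership development may impact corporate strategy, operational execution, and investor confidence in the company's direction."),
--               (('product', 'launch', 'innovation', 'technology'),
--                "This product development could drive revenue growth, enhance competitive positioning, and influence market share dynamics."),
--               (('stock', 'market', 'trading'),
--                "This market news could affect investment decisions and portfolio performance.")),
--        "This business development could impact economic trends and market conditions.")
-- _TABLE['business'] = _biz
-- _TABLE['finance'] = _biz
-- _TABLE['economy'] = _biz
--
-- _health = (_flat((('covid', 'pandemic', 'vaccine'),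
--                   "This health update may affect public health policies and safety measures.")),
--            "This health news could influence medical practices and patient care.")
-- _TABLE['health'] = _health
-- _TABLE['medical'] = _health
--
-- _TABLE['sports'] = (_flat((('championship', 'final', 'playoff'),
--                            "This major sporting event could determine championship outcomes and legacy records.")),
--                     "This sports update may affect team standings and upcoming match dynamics.")
--
-- _TABLE['entertainment'] = ([],
--                            "This entertainment news reflects current cultural trends and audience preferences.")
--
-- _GLOBAL_DEFAULT = "This story contributes to your comprehensive understanding of current events."
--
--
-- def _get_category_context(category: str, title: str, keywords: List[str]) -> str:
--     """Generate category-specific context: one hash lookup on the category,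
--     then one flat first-match scan of (keyword, message) pairs."""
--     entry = _TABLE.get(category.lower())
--     if entry is None:
--         return _GLOBAL_DEFAULT
--     flat_rules, default = entry
--     title_lower = title.lower()
--     return next((msg for kw, msg in flat_rules if kw in title_lower), default)
-- ===== Notes on version B (the rewrite author's own statement) =====
-- stated objective: simpler
-- what changed: Replaced the if/elif cascade by a dictionary keyed directly by each accepted lower-cased category name (one hash lookup instead of membership scans) whose value is a pre-flattened ordered (keyword, message) list plus a default, consumed by a single first-match scan instead of nested rule loops.
import Mathlib
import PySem

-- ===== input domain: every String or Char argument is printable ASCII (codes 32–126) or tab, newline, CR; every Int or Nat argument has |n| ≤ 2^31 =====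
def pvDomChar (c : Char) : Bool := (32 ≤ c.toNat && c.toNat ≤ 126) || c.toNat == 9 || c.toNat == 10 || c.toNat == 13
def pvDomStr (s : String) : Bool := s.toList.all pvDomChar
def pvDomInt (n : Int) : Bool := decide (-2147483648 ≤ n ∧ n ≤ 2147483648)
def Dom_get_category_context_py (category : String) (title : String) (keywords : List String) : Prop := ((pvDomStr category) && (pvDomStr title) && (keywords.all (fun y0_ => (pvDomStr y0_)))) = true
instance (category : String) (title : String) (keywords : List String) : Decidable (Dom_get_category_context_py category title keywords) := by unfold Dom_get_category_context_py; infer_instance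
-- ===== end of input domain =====

-- B replaces A's if/elif cascade by a dictionary keyed by category name plus one flat first-match keyword scan (objective: simpler).


-- ===== PORT A =====
-- Literal transliteration of the Python if/elif cascade of _get_category_context.
def get_category_context_py (category : String) (title : String) (_keywords : List String) : String :=
  let cl := PySem.Str.lower category
  let tl := PySem.Str.lower title
  if ["politics", "government"].contains cl then
    if ["election", "vote", "campaign"].any (fun w => PySem.Str.isIn w tl) then "This political development could influence upcoming electoral processes and policy decisions."
    else if ["policy", "law", "regulation"].any (fun w => PySem.Str.isIn w tl) then "This policy change may affect regulatory frameworks and citizen rights."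
    else "This political news could have implications for governance and public policy."
  else if ["technology", "tech"].contains cl then
    if ["ai", "artificial intelligence", "machine learning"].any (fun w => PySem.Str.isIn w tl) then "This AI development could reshape technology applications and industry standards."
    else if ["crypto", "bitcoin", "blockchain"].any (fun w => PySem.Str.isIn w tl) then "This cryptocurrency news may impact digital asset markets and regulatory approaches."
    else "This technology update could influence digital innovation and market trends."
  else if ["business", "finance", "economy"].contains cl then
    if ["earnings", "quarterly", "revenue", "profit"].any (fun w => PySem.Str.isIn w tl) then "These financial results may influence company valuations, investor sentiment, and sector-wide performance metrics."
    else if ["acquisition", "merger", "deal", "buyout"].any (fun w => PySem.Str.isIn w tl) then "This M&A activity could reshape competitive dynamics, create market consolidation, and influence strategic positioning across the industry."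
    else if ["ceo", "leadership", "executive", "management"].any (fun w => PySem.Str.isIn w tl) then "This leadership development may impact corporate strategy, operational execution, and investor confidence in the company's direction."
    else if ["product", "launch", "innovation", "technology"].any (fun w => PySem.Str.isIn w tl) then "This product development could drive revenue growth, enhance competitive positioning, and influence market share dynamics."
    else if ["stock", "market", "trading"].any (fun w => PySem.Str.isIn w tl) then "This market news could affect investment decisions and portfolio performance."
    else "This business development could impact economic trends and market conditions."
  else if ["health", "medical"].contains cl then
    if ["covid", "pandemic", "vaccine"].any (fun w => PySem.Str.isIn w tl) then "This health update may affect public health policies and safety measures."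
    else "This health news could influence medical practices and patient care."
  else if ["sports"].contains cl then
    if ["championship", "final", "playoff"].any (fun w => PySem.Str.isIn w tl) then "This major sporting event could determine championship outcomes and legacy records."
    else "This sports update may affect team standings and upcoming match dynamics."
  else if ["entertainment"].contains cl then
    "This entertainment news reflects current cultural trends and audience preferences."
  else "This story contributes to your comprehensive understanding of current events."

-- ===== PORT B =====
-- Source B's _flat: flatten (keywords, message) rules into one ordered (keyword, message) list.
def pvFlat : List (List String × String) → List (String × String)
  | [] => []
  | (ws, m) :: rest => ws.map (fun w => (w, m)) ++ pvFlat rest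

-- Source B's next((msg for kw, msg in flat_rules if kw in title_lower), default) — first-match scan.
def pvFirstMatch (tl : String) : List (String × String) → Option String
  | [] => none
  | (kw, msg) :: rest => if PySem.Str.isIn kw tl then some msg else pvFirstMatch tl rest

def pvPol : List (String × String) × String :=
  (pvFlat [(["election", "vote", "campaign"], "This political development could influence upcoming electoral processes and policy decisions."),
           (["policy", "law", "regulation"], "This policy change may affect regulatory frameworks and citizen rights.")],
   "This political news could have implications for governance and public policy.")

def pvTech : List (String × String) × String :=
  (pvFlat [(["ai", "artificial intelligence", "machine learning"], "This AI development could reshape technology applications and industry standards."),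
           (["crypto", "bitcoin", "blockchain"], "This cryptocurrency news may impact digital asset markets and regulatory approaches.")],
   "This technology update could influence digital innovation and market trends.")

def pvBiz : List (String × String) × String :=
  (pvFlat [(["earnings", "quarterly", "revenue", "profit"], "These financial results may influence company valuations, investor sentiment, and sector-wide performance metrics."),
           (["acquisition", "merger", "deal", "buyout"], "This M&A activity could reshape competitive dynamics, create market consolidation, and influence strategic positioning across the industry."),
           (["ceo", "leadership", "executive", "management"], "This leadership development may impact corporate strategy, operational execution, and investor confidence in the company's direction."),
           (["product", "launch", "innovation", "technology"], "This product development could drive revenue growth, enhance competitive positioning, and influence market share dynamics."),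
           (["stock", "market", "trading"], "This market news could affect investment decisions and portfolio performance.")],
   "This business development could impact economic trends and market conditions.")

def pvHealth : List (String × String) × String :=
  (pvFlat [(["covid", "pandemic", "vaccine"], "This health update may affect public health policies and safety measures.")],
   "This health news could influence medical practices and patient care.")

def pvSports : List (String × String) × String :=
  (pvFlat [(["championship", "final", "playoff"], "This major sporting event could determine championship outcomes and legacy records.")],
   "This sports update may affect team standings and upcoming match dynamics.")

def pvEnt : List (String × String) × String :=
  ([], "This entertainment news reflects current cultural trends and audience preferences.")

-- Source B's _TABLE: an insertion-ordered dict with twelve distinct keys.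
def pvTable : PySem.Dict String (List (String × String) × String) :=
  PySem.Dict.mk
    [("politics", pvPol), ("government", pvPol),
     ("technology", pvTech), ("tech", pvTech),
     ("business", pvBiz), ("finance", pvBiz), ("economy", pvBiz),
     ("health", pvHealth), ("medical", pvHealth),
     ("sports", pvSports), ("entertainment", pvEnt)]

def pvGlobalDefault : String := "This story contributes to your comprehensive understanding of current events."

def get_category_context_py_alt (category : String) (title : String) (_keywords : List String) : String :=
  match pvTable.get? (PySem.Str.lower category) with
  | none => pvGlobalDefault
  | some (flatRules, dflt) => (pvFirstMatch (PySem.Str.lower title) flatRules).getD dflt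

-- ===== PRECONDITION & SPEC =====
def Spec_get_category_context_py (category : String) (title : String) (keywords : List String) (out : String) : Prop := out = get_category_context_py_alt category title keywords
instance (category : String) (title : String) (keywords : List String) (out : String) : Decidable (Spec_get_category_context_py category title keywords out) := by unfold Spec_get_category_context_py; infer_instance

-- ===== CLAIM (what is proved, stated in full; the proofs are below) =====
def Claim_equal_get_category_context_py : Prop := ∀ (category : String) (title : String) (keywords : List String), Dom_get_category_context_py category title keywords → Spec_get_category_context_py category title keywords (get_category_context_py category title keywords)

-- ===== LEMMAS AND PROOFS =====

theorem pvIf_or {α : Type} (p q : Prop) [Decidable p] [Decidable q] (m x : α) :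
    (if p ∨ q then m else x) = if p then m else if q then m else x := by
  by_cases hp : p <;> by_cases hq : q <;> simp [hp, hq]

theorem pvGetD_if {α : Type} (c : Prop) [Decidable c] (a : α) (o : Option α) (d : α) :
    (if c then some a else o).getD d = if c then a else o.getD d := by
  split_ifs <;> rfl

-- ===== VERDICT (by name: the statement is the Claim_ definition above) =====
set_option maxHeartbeats 1000000 in
set_option maxRecDepth 4000 in
theorem get_category_context_py_spec : Claim_equal_get_category_context_py := by
  intro category title keywords _
  unfold Spec_get_category_context_py get_category_context_py get_category_context_py_alt
  generalize PySem.Str.lower category = cl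
  generalize PySem.Str.lower title = tl
  by_cases h1 : cl = "politics"
  · subst h1; simp [pvTable, pvPol, pvFlat, PySem.Dict.get?_mk_cons, pvGetD_if, pvFirstMatch, pvIf_or]
  by_cases h2 : cl = "government"
  · subst h2; simp [pvTable, pvPol, pvFlat, PySem.Dict.get?_mk_cons, pvGetD_if, pvFirstMatch, pvIf_or]
  by_cases h3 : cl = "technology"
  · subst h3; simp [pvTable, pvTech, pvFlat, PySem.Dict.get?_mk_cons, pvGetD_if, pvFirstMatch, pvIf_or]
  by_cases h4 : cl = "tech"
  · subst h4; simp [pvTable, pvTech, pvFlat, PySem.Dict.get?_mk_cons, pvGetD_if, pvFirstMatch, pvIf_or]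
  by_cases h5 : cl = "business"
  · subst h5; simp [pvTable, pvBiz, pvFlat, PySem.Dict.get?_mk_cons, pvGetD_if, pvFirstMatch, pvIf_or]
  by_cases h6 : cl = "finance"
  · subst h6; simp [pvTable, pvBiz, pvFlat, PySem.Dict.get?_mk_cons, pvGetD_if, pvFirstMatch, pvIf_or]
  by_cases h7 : cl = "economy"
  · subst h7; simp [pvTable, pvBiz, pvFlat, PySem.Dict.get?_mk_cons, pvGetD_if, pvFirstMatch, pvIf_or]
  by_cases h8 : cl = "health"
  · subst h8; simp [pvTable, pvHealth, pvFlat, PySem.Dict.get?_mk_cons, pvGetD_if, pvFirstMatch, pvIf_or]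
  by_cases h9 : cl = "medical"
  · subst h9; simp [pvTable, pvHealth, pvFlat, PySem.Dict.get?_mk_cons, pvGetD_if, pvFirstMatch, pvIf_or]
  by_cases h10 : cl = "sports"
  · subst h10; simp [pvTable, pvSports, pvFlat, PySem.Dict.get?_mk_cons, pvGetD_if, pvFirstMatch, pvIf_or]
  by_cases h11 : cl = "entertainment"
  · subst h11; simp [pvTable, pvEnt, PySem.Dict.get?_mk_cons, pvFirstMatch]
  have g1 : ¬("politics" = cl) := fun e => h1 e.symm
  have g2 : ¬("government" = cl) := fun e => h2 e.symm
  have g3 : ¬("technology" = cl) := fun e => h3 e.symm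
  have g4 : ¬("tech" = cl) := fun e => h4 e.symm
  have g5 : ¬("business" = cl) := fun e => h5 e.symm
  have g6 : ¬("finance" = cl) := fun e => h6 e.symm
  have g7 : ¬("economy" = cl) := fun e => h7 e.symm
  have g8 : ¬("health" = cl) := fun e => h8 e.symm
  have g9 : ¬("medical" = cl) := fun e => h9 e.symm
  have g10 : ¬("sports" = cl) := fun e => h10 e.symm
  have g11 : ¬("entertainment" = cl) := fun e => h11 e.symm
  simp only [pvTable, PySem.Dict.get?_mk_cons, beq_iff_eq, g1, g2, g3, g4, g5, g6, g7, g8, g9, g10, g11, if_false]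
  simp [pvGlobalDefault, PySem.Dict.get?, h1, h2, h3, h4, h5, h6, h7, h8, h9, h10, h11]
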